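-- pv_equiv track=rewrite | github.com/eprj453/ALGORITHM | PYTHON/SSAFY/32_day_191112/2383_점심식사시간.py | popPeople
-- ===== SOURCE A (Python) =====
-- def popPeople(arr, wait, stair, length):
--     n = 0
--     while n < len(arr):
--         if arr[n] == 0:
--             if len(arr) >= 3:
--                 wait.append(length)
--             else:
--                 stair.append(length)
--             arr.pop(n)
--         else:
--             arr[n] -= 1
--             n += 1
--     return arr, wait, stair
-- ===== SOURCE B (Python) =====
-- def popPeople(arr, wait, stair, length):
--     L = len(arr)
--     z = arr.count(0)
--     w = max(0, min(z, L - 2))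
--     wait += [length] * w
--     stair += [length] * (z - w)
--     arr[:] = [x - 1 for x in arr if x != 0]
--     return arr, wait, stair
-- ===== Notes on version B (the rewrite author's own statement) =====
-- stated objective: simpler
-- what changed: Replaces the per-element pop-and-decrement simulation loop with a closed form: the number of zeros routed to wait is max(0, min(z, L-2)) since the k-th removed zero sees current length L-(k-1); the new arr is one filter-and-decrement comprehension.
import Mathlib
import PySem

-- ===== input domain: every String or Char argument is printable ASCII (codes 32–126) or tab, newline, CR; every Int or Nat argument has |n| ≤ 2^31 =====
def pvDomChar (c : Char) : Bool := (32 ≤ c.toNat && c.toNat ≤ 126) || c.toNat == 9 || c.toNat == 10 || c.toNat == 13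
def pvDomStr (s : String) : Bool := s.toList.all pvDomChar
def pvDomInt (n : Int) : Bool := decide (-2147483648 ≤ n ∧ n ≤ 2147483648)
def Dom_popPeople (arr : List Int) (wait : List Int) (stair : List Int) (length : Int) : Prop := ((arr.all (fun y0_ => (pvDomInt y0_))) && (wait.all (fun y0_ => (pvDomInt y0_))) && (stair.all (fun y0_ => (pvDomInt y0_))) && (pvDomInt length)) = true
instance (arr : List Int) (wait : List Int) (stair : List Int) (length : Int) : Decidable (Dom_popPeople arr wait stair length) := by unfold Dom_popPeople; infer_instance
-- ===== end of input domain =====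

-- B replaces A's pop-and-decrement simulation loop with a closed-form routing count
-- plus one filter-and-decrement pass (objective: simpler). Both Pythons mutate
-- arr/wait/stair in place identically; the proof is about the returned triple.

-- ===== PORT A =====
-- while-loop of A: state (arr, wait, stair, n); pop(n) is eraseIdx, arr[n] -= 1 is set.
def popLoopA (arr : List Int) (wait : List Int) (stair : List Int) (length : Int) (n : Nat) : List Int × List Int × List Int :=
  if h : n < arr.length then
    if arr[n] = 0 then
      if 3 ≤ arr.length then
        popLoopA (arr.eraseIdx n) (wait ++ [length]) stair length n
      else
        popLoopA (arr.eraseIdx n) wait (stair ++ [length]) length n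
    else
      popLoopA (arr.set n (arr[n] - 1)) wait stair length (n + 1)
  else
    (arr, wait, stair)
termination_by arr.length - n
decreasing_by
  · simp [List.length_eraseIdx, h]; omega
  · simp [List.length_eraseIdx, h]; omega
  · rw [List.length_set]; omega

def popPeople (arr : List Int) (wait : List Int) (stair : List Int) (length : Int) : List Int × List Int × List Int :=
  popLoopA arr wait stair length 0

-- ===== PORT B =====
def popPeople_alt (arr : List Int) (wait : List Int) (stair : List Int) (length : Int) : List Int × List Int × List Int :=
  let L : Int := arr.length
  let z : Int := arr.count 0
  let w : Int := max 0 (min z (L - 2))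
  ((arr.filter (fun x => x ≠ 0)).map (fun x => x - 1),
   wait ++ List.replicate w.toNat length,
   stair ++ List.replicate (z - w).toNat length)

-- ===== PRECONDITION & SPEC =====
def Spec_popPeople (arr : List Int) (wait : List Int) (stair : List Int) (length : Int) (out : List Int × List Int × List Int) : Prop := out = popPeople_alt arr wait stair length
instance (arr : List Int) (wait : List Int) (stair : List Int) (length : Int) (out : List Int × List Int × List Int) : Decidable (Spec_popPeople arr wait stair length out) := by unfold Spec_popPeople; infer_instance

-- ===== CLAIM (what is proved, stated in full; the proofs are below) =====
def Claim_equal_popPeople : Prop := ∀ (arr : List Int) (wait : List Int) (stair : List Int) (length : Int), Dom_popPeople arr wait stair length → Spec_popPeople arr wait stair length (popPeople arr wait stair length)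

-- ===== LEMMAS AND PROOFS =====

-- Characterisation of A's loop: with arr = pre ++ suf and n = pre.length, the loop
-- leaves pre intact, filters+decrements suf, and routes min(z, L-2) zeros to wait.
lemma popLoopA_eq (suf : List Int) : ∀ (pre wait stair : List Int) (length : Int),
    popLoopA (pre ++ suf) wait stair length pre.length =
      (pre ++ (suf.filter (fun x => x ≠ 0)).map (fun x => x - 1),
       wait ++ List.replicate (min (suf.count 0) ((pre.length + suf.length) - 2)) length,
       stair ++ List.replicate (suf.count 0 - min (suf.count 0) ((pre.length + suf.length) - 2)) length) := by
  induction suf with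
  | nil =>
      intro pre wait stair length
      rw [popLoopA]
      simp
  | cons x t ih =>
      intro pre wait stair length
      rw [popLoopA]
      have hlt : pre.length < (pre ++ x :: t).length := by simp
      rw [dif_pos hlt]
      have hget : (pre ++ x :: t)[pre.length] = x := by simp
      rw [hget]
      have herase : (pre ++ x :: t).eraseIdx pre.length = pre ++ t := by
        simp [List.eraseIdx_append_of_length_le (le_refl pre.length)]
      have hz : t.count 0 ≤ t.length := List.count_le_length
      by_cases hx : x = 0
      · rw [if_pos hx]
        subst hx
        by_cases h3 : 3 ≤ (pre ++ (0 : Int) :: t).length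
        · rw [if_pos h3, herase, ih]
          simp only [List.length_append, List.length_cons] at h3
          simp only [Prod.mk.injEq]
          refine ⟨by simp, ?_, ?_⟩
          · rw [List.append_assoc, List.singleton_append, ← List.replicate_succ]
            congr 2
            simp
            omega
          · congr 2
            simp
            omega
        · rw [if_neg h3, herase, ih]
          simp only [List.length_append, List.length_cons] at h3
          simp only [Prod.mk.injEq]
          refine ⟨by simp, ?_, ?_⟩
          · congr 2
            simp
            omega
          · rw [List.append_assoc, List.singleton_append, ← List.replicate_succ]
            congr 2
            simp
            omega
      · rw [if_neg hx]
        have hset : (pre ++ x :: t).set pre.length (x - 1) = (pre ++ [x - 1]) ++ t := by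
          rw [List.set_append_right _ _ (le_refl pre.length)]
          simp
        rw [hset]
        have hn : pre.length + 1 = (pre ++ [x - 1]).length := by simp
        rw [hn, ih]
        have hcnt : (x :: t).count 0 = t.count 0 := by
          simp [hx]
        simp only [Prod.mk.injEq]
        refine ⟨by simp [hx], ?_, ?_⟩
        · rw [hcnt]
          congr 2
          simp only [List.length_append, List.length_cons, List.length_nil]
          omega
        · rw [hcnt]
          congr 2
          simp only [List.length_append, List.length_cons, List.length_nil]
          omega

theorem popPeople_spec : Claim_equal_popPeople := by
  intro arr wait stair length _
  unfold Spec_popPeople popPeople popPeople_alt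
  have h := popLoopA_eq arr [] wait stair length
  simp only [List.nil_append, List.length_nil, Nat.zero_add] at h
  rw [h]
  refine Prod.ext rfl (Prod.ext ?_ ?_) <;> simp only
  · congr 1
    have hz : arr.count 0 ≤ arr.length := List.count_le_length
    congr 1
    omega
  · congr 1
    have hz : arr.count 0 ≤ arr.length := List.count_le_length
    congr 1
    omega
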